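-- pv_equiv track=rewrite | github.com/Trunks159/Hangboy | hangmanfunctions.py | make_placeholder
-- ===== SOURCE A (Python) =====
-- def make_placeholder(hangman, guessed_letter, guessed_letters):
-- 	placeholder = ""
-- 	for letter in hangman: # MOST DIFFICULT PART OF THE PROGRAM TO CONSTRUCT
-- 		if guessed_letters != []:
-- 			j = 1
-- 			for guessed_letter in guessed_letters: #goes through each letter in bank
-- 				if letter == guessed_letter:
-- 					placeholder += guessed_letter
-- 					break
-- 				elif (letter != guessed_letter) and (j == len(guessed_letters)):
-- 					placeholder += " _"
-- 				j += 1
-- 		else: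
-- 			placeholder += "_ "
--
-- 	return placeholder
-- ===== SOURCE B (Python) =====
-- def make_placeholder(hangman, guessed_letter, guessed_letters):
--     if not guessed_letters:
--         return "_ " * len(hangman)
--     res = [" _"] * len(hangman)
--     for g in guessed_letters:
--         res = [c if c == g else r for c, r in zip(hangman, res)]
--     return "".join(res)
-- ===== Notes on version B (the rewrite author's own statement) =====
-- stated objective: alternative
-- what changed: B replaces A's per-character inner scan of the guess bank (with a manual 1-based counter deciding when to emit the miss marker) by a scatter pass: start from an all-miss marker list and sweep each guessed letter over the word in one comprehension, revealing matching positions, then join.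
import Mathlib
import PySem

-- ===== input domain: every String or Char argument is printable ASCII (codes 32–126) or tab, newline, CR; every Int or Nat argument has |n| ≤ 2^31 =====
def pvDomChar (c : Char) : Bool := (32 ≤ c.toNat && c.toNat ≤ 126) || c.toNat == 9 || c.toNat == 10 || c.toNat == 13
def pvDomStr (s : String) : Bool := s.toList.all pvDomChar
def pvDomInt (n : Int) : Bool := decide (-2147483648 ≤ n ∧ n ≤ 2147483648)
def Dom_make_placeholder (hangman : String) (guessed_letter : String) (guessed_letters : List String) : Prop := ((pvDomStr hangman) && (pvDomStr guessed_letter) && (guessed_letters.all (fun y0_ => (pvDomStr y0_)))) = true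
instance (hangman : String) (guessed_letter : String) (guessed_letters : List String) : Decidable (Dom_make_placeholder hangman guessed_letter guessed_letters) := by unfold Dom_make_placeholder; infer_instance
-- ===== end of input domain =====

-- B replaces A's per-character inner scan of the guess bank (manual 1-based counter for the
-- miss marker) by a scatter pass over the guessed letters; same cost, different structure.

-- ===== PORT A =====
-- inner 'for guessed_letter in guessed_letters' loop of A, with the 1-based counter j
-- and n = len(guessed_letters); break = returning without recursing further.
def mpInnerA (letter : Char) : List String → Int → Int → String
  | [], _, _ => ""
  | g :: rest, j, n =>
    if String.mk [letter] = g then g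
    else if j = n then " _" ++ mpInnerA letter rest (j + 1) n
    else mpInnerA letter rest (j + 1) n

def make_placeholder (hangman : String) (guessed_letter : String) (guessed_letters : List String) : String :=
  hangman.toList.foldl
    (fun placeholder letter =>
      if guessed_letters ≠ [] then
        placeholder ++ mpInnerA letter guessed_letters 1 (guessed_letters.length : Int)
      else
        placeholder ++ "_ ")
    ""

-- ===== PORT B =====
def make_placeholder_alt (hangman : String) (guessed_letter : String) (guessed_letters : List String) : String :=
  if guessed_letters = [] then
    String.join (List.replicate hangman.toList.length "_ ")
  else
    String.join
      (guessed_letters.foldl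
        (fun res g =>
          List.zipWith (fun c r => if String.mk [c] = g then String.mk [c] else r)
            hangman.toList res)
        (List.replicate hangman.toList.length " _"))

-- ===== PRECONDITION & SPEC =====
def Spec_make_placeholder (hangman : String) (guessed_letter : String) (guessed_letters : List String) (out : String) : Prop := out = make_placeholder_alt hangman guessed_letter guessed_letters
instance (hangman : String) (guessed_letter : String) (guessed_letters : List String) (out : String) : Decidable (Spec_make_placeholder hangman guessed_letter guessed_letters out) := by unfold Spec_make_placeholder; infer_instance

-- ===== CLAIM (what is proved, stated in full; the proofs are below) =====
def Claim_equal_make_placeholder : Prop := ∀ (hangman : String) (guessed_letter : String) (guessed_letters : List String), Dom_make_placeholder hangman guessed_letter guessed_letters → Spec_make_placeholder hangman guessed_letter guessed_letters (make_placeholder hangman guessed_letter guessed_letters)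

-- ===== LEMMAS AND PROOFS =====

-- A's outer loop accumulates by appending; it is the join of a per-character map.
theorem mp_foldl_strs (l : List String) (a : String) :
    l.foldl (fun r s => r ++ s) a = a ++ l.foldl (fun r s => r ++ s) "" := by
  induction l generalizing a with
  | nil => simp
  | cons x xs ih =>
    rw [List.foldl_cons, List.foldl_cons, ih ("" ++ x), ih (a ++ x)]
    simp [String.append_assoc]

theorem mp_foldl_append_join (f : Char → String) (l : List Char) (acc : String) :
    l.foldl (fun a c => a ++ f c) acc = acc ++ String.join (l.map f) := by
  induction l generalizing acc with
  | nil => simp [String.join]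
  | cons x xs ih =>
    simp only [List.foldl_cons, ih, List.map_cons, String.join]
    rw [mp_foldl_strs (List.map f xs) ("" ++ f x)]
    simp [String.append_assoc]

-- characterisation of A's inner scan (j is the 1-based counter, n the bank length)
theorem mp_innerA_char (c : Char) (gs : List String) (g : String) (j n : Int)
    (h : j + (g :: gs).length = n + 1) :
    mpInnerA c (g :: gs) j n =
      (if String.mk [c] ∈ g :: gs then String.mk [c] else " _") := by
  induction gs generalizing g j with
  | nil =>
    simp only [List.length_cons, List.length_nil] at h
    have hj : j = n := by omega
    by_cases hc : String.mk [c] = g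
    · simp [mpInnerA, hc]
    · simp [mpInnerA, hc, hj, Ne.symm hc]
  | cons g2 rest ih =>
    have hj : j ≠ n := by
      simp only [List.length_cons] at h ⊢
      omega
    by_cases hc : String.mk [c] = g
    · simp [mpInnerA, hc]
    · have h2 : (j + 1) + (g2 :: rest).length = n + 1 := by
        simp only [List.length_cons] at h ⊢; omega
      conv_lhs => rw [mpInnerA]
      rw [if_neg hc, if_neg hj, ih g2 (j + 1) h2]
      simp [List.mem_cons, hc]

-- one scatter step of B, acting on a mapped list
theorem mp_zip_step (g : String) (f : Char → String) (chars : List Char) :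
    List.zipWith (fun c r => if String.mk [c] = g then String.mk [c] else r)
        chars (chars.map f)
      = chars.map (fun c => if String.mk [c] = g then String.mk [c] else f c) := by
  induction chars with
  | nil => simp
  | cons x xs ih => simp [ih]

-- B's scatter fold over the guesses, as a per-character map
theorem mp_scatter_char (gs : List String) (chars : List Char) (f : Char → String) :
    gs.foldl
        (fun res g =>
          List.zipWith (fun c r => if String.mk [c] = g then String.mk [c] else r)
            chars res)
        (chars.map f)
      = chars.map (fun c => if String.mk [c] ∈ gs then String.mk [c] else f c) := by
  induction gs generalizing f with
  | nil => simp
  | cons g rest ih =>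
    rw [List.foldl_cons, mp_zip_step, ih]
    apply List.map_congr_left
    intro c _
    by_cases h1 : String.mk [c] ∈ rest
    · simp [h1, List.mem_cons]
    · by_cases h2 : String.mk [c] = g <;> simp [h1, h2, List.mem_cons]


-- ===== VERDICT (by name: the statement is the Claim_ definition above) =====
theorem make_placeholder_spec : Claim_equal_make_placeholder := by
  intro hangman guessed_letter guessed_letters _
  unfold Spec_make_placeholder make_placeholder make_placeholder_alt
  by_cases hg : guessed_letters = []
  · simp only [hg, if_pos rfl, ne_eq, not_true_eq_false, if_false]
    rw [mp_foldl_append_join (fun _ => "_ ")]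
    rw [show (fun (_ : Char) => "_ ") = Function.const Char "_ " from rfl]
    simp [List.map_const, String.join]
  · simp only [hg, if_neg hg, ne_eq, not_false_eq_true, if_true]
    rw [mp_foldl_append_join
      (fun c => mpInnerA c guessed_letters 1 (guessed_letters.length : Int))]
    rw [show (List.replicate hangman.toList.length " _")
          = hangman.toList.map (fun _ => " _") by simp [List.map_const]]
    rw [mp_scatter_char]
    obtain ⟨g, rest, rfl⟩ := List.exists_cons_of_ne_nil hg
    have key : ∀ c : Char, mpInnerA c (g :: rest) 1 ((rest.length : Int) + 1)
        = (if String.mk [c] ∈ g :: rest then String.mk [c] else " _") := fun c =>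
      mp_innerA_char c rest g 1 _ (by simp [List.length_cons]; omega)
    simp [key, List.mem_cons]
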